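-- pv_equiv track=rewrite | github.com/chen6019/File_tool | 批量重命名.py | format_sequence
-- ===== SOURCE A (Python) =====
-- def format_sequence(idx: int, fmt: str) -> str:
-- 	"""根据格式字符串生成序号文本。
-- 	fmt 取值:
-- 	  1   -> 1,2,3
-- 	  01  -> 01,02,03
-- 	  001 -> 001,002,003
-- 	  A   -> A,B,...,Z,AA,AB,... (26 进制)
-- 	  a   -> a,b,...
-- 	  I   -> 罗马数字 (大写)
-- 	  i   -> 罗马数字 (小写)
-- 	"""
-- 	n = idx
-- 	if fmt == '1':
-- 		return str(n)
-- 	if fmt == '01':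
-- 		return f"{n:02d}"
-- 	if fmt == '001':
-- 		return f"{n:03d}"
-- 	if fmt in ('A', 'a'):
-- 		# Excel 列号式
-- 		letters = []
-- 		x = n
-- 		while x > 0:
-- 			x -= 1
-- 			x, r = divmod(x, 26)
-- 			letters.append(chr(ord('A') + r))
-- 		s = ''.join(reversed(letters))
-- 		return s if fmt == 'A' else s.lower()
-- 	if fmt in ('I', 'i'):
-- 		return to_roman(n, lower=(fmt == 'i'))
-- 	return str(n)
--
-- def to_roman(num: int, lower: bool = False) -> str:
-- 	if num <= 0:
-- 		return str(num)
-- 	vals = [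
-- 		(1000, 'M'), (900, 'CM'), (500, 'D'), (400, 'CD'),
-- 		(100, 'C'), (90, 'XC'), (50, 'L'), (40, 'XL'),
-- 		(10, 'X'), (9, 'IX'), (5, 'V'), (4, 'IV'), (1, 'I')
-- 	]
-- 	res = []
-- 	n = num
-- 	for v, sym in vals:
-- 		while n >= v:
-- 			res.append(sym)
-- 			n -= v
-- 	s = ''.join(res)
-- 	return s.lower() if lower else s
-- ===== SOURCE B (Python) =====
-- ONES = ['', 'I', 'II', 'III', 'IV', 'V', 'VI', 'VII', 'VIII', 'IX']
-- TENS = ['', 'X', 'XX', 'XXX', 'XL', 'L', 'LX', 'LXX', 'LXXX', 'XC']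
-- HUNS = ['', 'C', 'CC', 'CCC', 'CD', 'D', 'DC', 'DCC', 'DCCC', 'CM']
--
-- def _letters(x: int) -> str:
-- 	# Excel column name, most-significant digit first, by recursion.
-- 	if x <= 0:
-- 		return ''
-- 	return _letters((x - 1) // 26) + chr(ord('A') + (x - 1) % 26)
--
-- def to_roman(num: int, lower: bool = False) -> str:
-- 	if num <= 0:
-- 		return str(num)
-- 	s = ('M' * (num // 1000) + HUNS[(num // 100) % 10]
-- 	     + TENS[(num // 10) % 10] + ONES[num % 10])
-- 	return s.lower() if lower else s
--
-- def format_sequence(idx: int, fmt: str) -> str: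
-- 	n = idx
-- 	if fmt == '1':
-- 		return str(n)
-- 	if fmt == '01':
-- 		return str(n).zfill(2)
-- 	if fmt == '001':
-- 		return str(n).zfill(3)
-- 	if fmt in ('A', 'a'):
-- 		s = _letters(n)
-- 		return s if fmt == 'A' else s.lower()
-- 	if fmt in ('I', 'i'):
-- 		return to_roman(n, lower=(fmt == 'i'))
-- 	return str(n)
-- ===== Notes on version B (the rewrite author's own statement) =====
-- stated objective: simpler
-- what changed: The greedy subtractive Roman-numeral loop is replaced by decimal-digit table lookups ('M'*(n//1000) plus hundreds/tens/ones tables) and the Excel-letter while-loop-with-reverse by a direct most-significant-first recursion; the zero-padded branches use str.zfill instead of f-string padding.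
import Mathlib
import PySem

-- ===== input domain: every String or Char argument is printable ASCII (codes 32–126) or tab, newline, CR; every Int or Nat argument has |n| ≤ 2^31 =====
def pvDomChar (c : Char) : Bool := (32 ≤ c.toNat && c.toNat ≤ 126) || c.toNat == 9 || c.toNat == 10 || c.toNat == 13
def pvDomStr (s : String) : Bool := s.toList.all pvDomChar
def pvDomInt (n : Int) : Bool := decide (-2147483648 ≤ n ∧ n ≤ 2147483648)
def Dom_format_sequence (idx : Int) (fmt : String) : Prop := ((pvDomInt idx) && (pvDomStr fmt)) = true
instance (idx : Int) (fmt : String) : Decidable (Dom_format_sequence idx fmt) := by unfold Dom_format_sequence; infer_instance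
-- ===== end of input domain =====

-- B replaces A's greedy subtractive Roman loop by decimal-digit table lookups and the
-- Excel-letter while-loop-with-reverse by a most-significant-first recursion (simpler).
-- Strings being joined are represented as lists of code points (''.join = flatten, exact).

-- ===== PORT A =====

-- the inner `while n >= v: res.append(sym); n -= v`; fuel = initial n makes it structural
-- (0 < v and n ≤ fuel always hold at the call sites, so this computes exactly the Python loop)
def whileGo (v : Nat) (sym : List Char) : Nat → Nat → List (List Char) → List (List Char) × Nat
  | fuel + 1, n, res => if v ≤ n ∧ 0 < v then whileGo v sym fuel (n - v) (res ++ [sym]) else (res, n)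
  | 0, n, res => (res, n)

def whileGeA (v : Nat) (sym : List Char) (n : Nat) (res : List (List Char)) : List (List Char) × Nat :=
  whileGo v sym n n res

def romanValsA : List (Nat × List Char) :=
  [(1000, ['M']), (900, ['C','M']), (500, ['D']), (400, ['C','D']),
   (100, ['C']), (90, ['X','C']), (50, ['L']), (40, ['X','L']),
   (10, ['X']), (9, ['I','X']), (5, ['V']), (4, ['I','V']), (1, ['I'])]

def to_romanA (num : Int) (lower : Bool) : String :=
  if num ≤ 0 then PySem.Int.toStr num
  else
    -- num > 0 here, so the loop state n is num.toNat and stays a Nat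
    let p := romanValsA.foldl (fun st vs => whileGeA vs.1 vs.2 st.2 st.1)
              (([] : List (List Char)), num.toNat)
    let s := String.mk p.1.flatten          -- ''.join(res)
    if lower then PySem.Str.lower s else s

-- `while x > 0: x -= 1; x, r = divmod(x, 26); letters.append(chr(ord('A') + r))`
def excelLoopA (x : Int) (letters : List Char) : List Char :=
  if hx : 0 < x then
    excelLoopA (PySem.Int.floordiv (x - 1) 26)
      (letters ++ [Char.ofNat (65 + (PySem.Int.mod (x - 1) 26).toNat)])
  else letters
termination_by x.toNat
decreasing_by
  have h1 : PySem.Int.floordiv (x - 1) 26 = (x - 1) / 26 :=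
    PySem.Int.floordiv_eq_ediv_of_pos (by norm_num)
  have h2 : (x - 1) / 26 ≤ x - 1 := Int.ediv_le_self _ (by omega)
  have h3 : 0 ≤ (x - 1) / 26 := Int.ediv_nonneg (by omega) (by norm_num)
  rw [h1]; omega

def format_sequence (idx : Int) (fmt : String) : String :=
  let n := idx
  if fmt = "1" then PySem.Int.toStr n
  else if fmt = "01" then PySem.Str.zfill (PySem.Int.toStr n) 2      -- f"{n:02d}"
  else if fmt = "001" then PySem.Str.zfill (PySem.Int.toStr n) 3     -- f"{n:03d}"
  else if fmt = "A" ∨ fmt = "a" then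
    let s := String.mk (excelLoopA n []).reverse                     -- ''.join(reversed(letters))
    if fmt = "A" then s else PySem.Str.lower s
  else if fmt = "I" ∨ fmt = "i" then to_romanA n (fmt = "i")
  else PySem.Int.toStr n

-- ===== PORT B =====

def romanOnes : List (List Char) :=
  [[], ['I'], ['I','I'], ['I','I','I'], ['I','V'], ['V'], ['V','I'], ['V','I','I'], ['V','I','I','I'], ['I','X']]
def romanTens : List (List Char) :=
  [[], ['X'], ['X','X'], ['X','X','X'], ['X','L'], ['L'], ['L','X'], ['L','X','X'], ['L','X','X','X'], ['X','C']]
def romanHuns : List (List Char) :=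
  [[], ['C'], ['C','C'], ['C','C','C'], ['C','D'], ['D'], ['D','C'], ['D','C','C'], ['D','C','C','C'], ['C','M']]

def to_romanB (num : Int) (lower : Bool) : String :=
  if num ≤ 0 then PySem.Int.toStr num
  else
    -- num > 0, so Python's // and % on num are Nat div/mod on num.toNat
    let n := num.toNat
    let s := String.mk (List.replicate (n / 1000) 'M' ++ romanHuns.getD (n / 100 % 10) []
              ++ romanTens.getD (n / 10 % 10) [] ++ romanOnes.getD (n % 10) [])
    if lower then PySem.Str.lower s else s

-- `_letters`: Excel column name, most-significant digit first, by recursion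
def lettersB (x : Int) : List Char :=
  if hx : x ≤ 0 then []
  else
    lettersB (PySem.Int.floordiv (x - 1) 26)
      ++ [Char.ofNat (65 + (PySem.Int.mod (x - 1) 26).toNat)]
termination_by x.toNat
decreasing_by
  have h1 : PySem.Int.floordiv (x - 1) 26 = (x - 1) / 26 :=
    PySem.Int.floordiv_eq_ediv_of_pos (by norm_num)
  have h2 : (x - 1) / 26 ≤ x - 1 := Int.ediv_le_self _ (by omega)
  have h3 : 0 ≤ (x - 1) / 26 := Int.ediv_nonneg (by omega) (by norm_num)
  rw [h1]; omega

def format_sequence_alt (idx : Int) (fmt : String) : String :=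
  let n := idx
  if fmt = "1" then PySem.Int.toStr n
  else if fmt = "01" then PySem.Str.zfill (PySem.Int.toStr n) 2
  else if fmt = "001" then PySem.Str.zfill (PySem.Int.toStr n) 3
  else if fmt = "A" ∨ fmt = "a" then
    let s := String.mk (lettersB n)
    if fmt = "A" then s else PySem.Str.lower s
  else if fmt = "I" ∨ fmt = "i" then to_romanB n (fmt = "i")
  else PySem.Int.toStr n

-- ===== PRECONDITION & SPEC =====
def Spec_format_sequence (idx : Int) (fmt : String) (out : String) : Prop := out = format_sequence_alt idx fmt
instance (idx : Int) (fmt : String) (out : String) : Decidable (Spec_format_sequence idx fmt out) := by unfold Spec_format_sequence; infer_instance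

-- ===== CLAIM (what is proved, stated in full; the proofs are below) =====
def Claim_equal_format_sequence : Prop := ∀ (idx : Int) (fmt : String), Dom_format_sequence idx fmt → Spec_format_sequence idx fmt (format_sequence idx fmt)

-- ===== LEMMAS AND PROOFS =====

theorem whileGo_eq (v : Nat) (sym : List Char) (hv : 0 < v) :
    ∀ (fuel n : Nat) (res : List (List Char)), n ≤ fuel →
      whileGo v sym fuel n res = (res ++ List.replicate (n / v) sym, n % v) := by
  intro fuel
  induction fuel with
  | zero =>
    intro n res hn
    have : n = 0 := by omega
    subst this
    simp [whileGo]
  | succ fuel ih =>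
    intro n res hn
    by_cases h : v ≤ n
    · rw [whileGo]
      simp only [h, hv, and_true, if_true]
      rw [ih (n - v) (res ++ [sym]) (by omega)]
      rw [Nat.div_eq_sub_div hv h, Nat.mod_eq_sub_mod h]
      simp [List.replicate_succ]
    · rw [whileGo, if_neg (by omega), Nat.div_eq_of_lt (by omega), Nat.mod_eq_of_lt (by omega)]
      simp

theorem whileGeA_eq (v : Nat) (sym : List Char) (n : Nat) (res : List (List Char)) (hv : 0 < v) :
    whileGeA v sym n res = (res ++ List.replicate (n / v) sym, n % v) :=
  whileGo_eq v sym hv n n res (le_refl n)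

theorem foldl_whileGeA_pre (l : List (Nat × List Char)) (hl : ∀ p ∈ l, 0 < p.1) :
    ∀ (res : List (List Char)) (n : Nat),
      l.foldl (fun st vs => whileGeA vs.1 vs.2 st.2 st.1) (res, n)
        = (res ++ (l.foldl (fun st vs => whileGeA vs.1 vs.2 st.2 st.1) ([], n)).1,
           (l.foldl (fun st vs => whileGeA vs.1 vs.2 st.2 st.1) ([], n)).2) := by
  induction l with
  | nil => intro res n; simp
  | cons p tl ih =>
    intro res n
    have hp : 0 < p.1 := hl p (List.mem_cons_self ..)
    have htl : ∀ q ∈ tl, 0 < q.1 := fun q hq => hl q (List.mem_cons_of_mem _ hq)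
    simp only [List.foldl_cons]
    rw [whileGeA_eq _ _ _ _ hp, whileGeA_eq _ _ _ _ hp]
    simp only [List.nil_append]
    rw [ih htl (res ++ List.replicate (n / p.1) p.2) (n % p.1),
        ih htl (List.replicate (n / p.1) p.2) (n % p.1)]
    simp

def romanRest : List (Nat × List Char) :=
  [(900, ['C','M']), (500, ['D']), (400, ['C','D']),
   (100, ['C']), (90, ['X','C']), (50, ['L']), (40, ['X','L']),
   (10, ['X']), (9, ['I','X']), (5, ['V']), (4, ['I','V']), (1, ['I'])]

def restChars (r : Nat) : List Char :=
  ((romanRest.foldl (fun st vs => whileGeA vs.1 vs.2 st.2 st.1) ([], r)).1).flatten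

def tableChars (r : Nat) : List Char :=
  romanHuns.getD (r / 100 % 10) [] ++ romanTens.getD (r / 10 % 10) [] ++ romanOnes.getD (r % 10) []

set_option maxRecDepth 40000 in
set_option maxHeartbeats 4000000 in
theorem rest_table : ∀ r < 1000, restChars r = tableChars r := by decide

theorem roman_eq (num : Int) (lower : Bool) : to_romanA num lower = to_romanB num lower := by
  by_cases h : num ≤ 0
  · simp [to_romanA, to_romanB, h]
  · unfold to_romanA to_romanB
    simp only [h, if_false]
    set n := num.toNat with hn
    have hstep :
        romanValsA.foldl (fun st vs => whileGeA vs.1 vs.2 st.2 st.1) ([], n)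
          = romanRest.foldl (fun st vs => whileGeA vs.1 vs.2 st.2 st.1)
              (List.replicate (n / 1000) ['M'], n % 1000) := by
      have hsplit : romanValsA = (1000, ['M']) :: romanRest := rfl
      rw [hsplit]
      simp only [List.foldl_cons]
      rw [whileGeA_eq 1000 ['M'] n [] (by norm_num)]
      simp
    have hrest : ∀ q ∈ romanRest, 0 < q.1 := by decide
    have hmain :
        (romanValsA.foldl (fun st vs => whileGeA vs.1 vs.2 st.2 st.1) ([], n)).1.flatten
          = List.replicate (n / 1000) 'M' ++ restChars (n % 1000) := by
      rw [hstep, foldl_whileGeA_pre romanRest hrest]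
      simp [restChars]
    have htab : restChars (n % 1000) = tableChars (n % 1000) :=
      rest_table _ (Nat.mod_lt _ (by norm_num))
    have h1 : n % 1000 / 100 % 10 = n / 100 % 10 := by omega
    have h2 : n % 1000 / 10 % 10 = n / 10 % 10 := by omega
    have h3 : n % 1000 % 10 = n % 10 := by omega
    simp only [hmain, htab, tableChars, h1, h2, h3, List.append_assoc]

theorem excelLoopA_eq : ∀ (k : Nat) (x : Int), x.toNat ≤ k →
    ∀ acc, excelLoopA x acc = acc ++ (lettersB x).reverse := by
  intro k
  induction k with
  | zero =>
    intro x hx acc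
    have hx0 : x ≤ 0 := by omega
    rw [excelLoopA, lettersB]
    simp [hx0, not_lt.mpr hx0]
  | succ k ih =>
    intro x hx acc
    by_cases hx0 : x ≤ 0
    · rw [excelLoopA, lettersB]
      simp [hx0, not_lt.mpr hx0]
    · have hpos : 0 < x := by omega
      have h1 : PySem.Int.floordiv (x - 1) 26 = (x - 1) / 26 :=
        PySem.Int.floordiv_eq_ediv_of_pos (by norm_num)
      have h2 : (x - 1) / 26 ≤ x - 1 := Int.ediv_le_self _ (by omega)
      have h3 : 0 ≤ (x - 1) / 26 := Int.ediv_nonneg (by omega) (by norm_num)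
      have hle : (PySem.Int.floordiv (x - 1) 26).toNat ≤ k := by rw [h1]; omega
      rw [excelLoopA, lettersB]
      simp only [hpos, hx0, dif_pos, dite_eq_ite, if_false]
      rw [ih _ hle]
      simp

-- ===== VERDICT (by name: the statement is the Claim_ definition above) =====
theorem format_sequence_spec : Claim_equal_format_sequence := by
  intro idx fmt _hdom
  unfold Spec_format_sequence format_sequence format_sequence_alt
  have hA : (excelLoopA idx []).reverse = lettersB idx := by
    rw [excelLoopA_eq idx.toNat idx (le_refl _) []]
    simp
  split_ifs with h1 h2 h3 h4 h5 h6
  · rfl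
  · rfl
  · rfl
  · simp only [hA]
  · simp only [hA]
  · exact roman_eq idx (fmt = "i")
  · rfl
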